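-- pv_equiv track=rewrite | github.com/h0353914/SemcCameraUI | tools_App/compare_java_smali.py | _merge_adjacent_stringbuilder_appends
-- ===== SOURCE A (Python) =====
-- def _merge_adjacent_stringbuilder_appends(instrs: list[str]) -> list[str]:
--     """
--     合併相鄰的 StringBuilder.append(String) 調用。
--
--     原始 dx 編譯：
--       const-string v1, "Foo"
--       invoke-virtual {v0, v1}, Ljava/lang/StringBuilder;->append(Ljava/lang/String;)...
--       const-string v1, "Bar"
--       invoke-virtual {v0, v1}, Ljava/lang/StringBuilder;->append(Ljava/lang/String;)...
--     JADX 反編譯會合併為 "FooBar"，D8 編回只剩一組。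
--     此函式將原始的多組合併為一組，使指令數一致。
--
--     同時處理 const-string + append(C) 形式（char 版 append），
--     以及插入在 append 之間的 append(C) (如逗號分隔符)。
--     """
--     result = []
--     i = 0
--     _SB_APPEND_STR = "Ljava/lang/StringBuilder;->append(Ljava/lang/String;)"
--     _SB_APPEND_CHAR = "Ljava/lang/StringBuilder;->append(C)"
--
--     while i < len(instrs):
--         s = instrs[i].strip()
--
--         # 偵測 const-string + invoke StringBuilder.append(String)
--         if s.startswith("const-string") and i + 1 < len(instrs):
--             next_s = instrs[i + 1].strip()
--             if _SB_APPEND_STR in next_s: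
--                 # 收集連續的 const-string + append(String) 對
--                 # 也跳過中間穿插的 append(C)（如逗號分隔符 const/16 + append(C)）
--                 merged_count = 0
--                 j = i
--                 while j < len(instrs):
--                     js = instrs[j].strip()
--                     if js.startswith("const-string") and j + 1 < len(instrs):
--                         ns = instrs[j + 1].strip()
--                         if _SB_APPEND_STR in ns:
--                             merged_count += 1
--                             j += 2
--                             continue
--                     # 也吃掉 const + append(C) 模式（如逗號分隔符）
--                     if (
--                         (js.startswith("const/") or js.startswith("const "))
--                         and j + 1 < len(instrs)
--                         and _SB_APPEND_CHAR in instrs[j + 1].strip()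
--                     ):
--                         merged_count += 1
--                         j += 2
--                         continue
--                     break
--
--                 if merged_count >= 2:
--                     # 合併成一組 const-string + append
--                     result.append(instrs[i])  # 保留第一個 const-string
--                     result.append(instrs[i + 1])  # 保留第一個 append
--                     i = j
--                     continue
--
--         result.append(instrs[i])
--         i += 1
--     return result
-- ===== SOURCE B (Python) =====
-- def _merge_adjacent_stringbuilder_appends(instrs: list[str]) -> list[str]:
--     _SB_APPEND_STR = "Ljava/lang/StringBuilder;->append(Ljava/lang/String;)"
--     _SB_APPEND_CHAR = "Ljava/lang/StringBuilder;->append(C)"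
--     n = len(instrs)
--     stripped = [s.strip() for s in instrs]
--     # backward DP: kind[i] (1 = const-string+append(String) pair start, 2 = const+append(C)
--     # pair start, 0 = neither) and run[i] = length of the step-2 pair chain starting at i.
--     kind = [0] * n
--     run = [0] * (n + 2)
--     for i in range(n - 1, -1, -1):
--         if i + 1 < n:
--             s = stripped[i]
--             if s.startswith("const-string") and _SB_APPEND_STR in stripped[i + 1]:
--                 kind[i] = 1
--             elif (s.startswith("const/") or s.startswith("const ")) and _SB_APPEND_CHAR in stripped[i + 1]:
--                 kind[i] = 2
--         run[i] = run[i + 2] + 1 if kind[i] else 0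
--     # emit: a chain of >= 2 pairs starting at a string-pair collapses to its first pair
--     out = []
--     i = 0
--     while i < n:
--         if kind[i] == 1 and run[i] >= 2:
--             out.append(instrs[i])
--             out.append(instrs[i + 1])
--             i += 2 * run[i]
--         else:
--             out.append(instrs[i])
--             i += 1
--     return out
-- ===== Notes on version B (the rewrite author's own statement) =====
-- stated objective: alternative
-- what changed: A detects merge runs with a nested while-loop that rescans and re-strips instructions from each candidate start; B strips once, then computes pair-chain run lengths by a single backward dynamic-programming pass (run[i]=run[i+2]+1), so the emit loop has no inner scan and jumps directly by 2*run[i].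
import Mathlib
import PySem

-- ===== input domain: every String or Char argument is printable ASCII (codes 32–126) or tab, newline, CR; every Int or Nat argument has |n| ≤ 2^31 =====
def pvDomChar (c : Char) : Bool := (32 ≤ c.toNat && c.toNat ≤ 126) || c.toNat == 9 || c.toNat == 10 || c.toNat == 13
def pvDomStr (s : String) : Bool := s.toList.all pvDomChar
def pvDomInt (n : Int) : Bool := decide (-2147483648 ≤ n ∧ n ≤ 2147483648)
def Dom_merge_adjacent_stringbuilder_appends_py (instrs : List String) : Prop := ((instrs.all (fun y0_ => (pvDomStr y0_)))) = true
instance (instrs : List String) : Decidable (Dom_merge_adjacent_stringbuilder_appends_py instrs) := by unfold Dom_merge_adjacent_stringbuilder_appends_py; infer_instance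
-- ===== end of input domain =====

-- B strips once and replaces A's nested rescanning while-loop by a backward dynamic-programming
-- pass computing pair-chain run lengths (run[i] = run[i+2]+1), so the emit loop jumps directly;
-- objective: alternative decomposition (same cost).
-- Both Python while-loops are ported with a structural fuel parameter (fuel = list length, always
-- sufficient): fuel only makes the recursion structural, it never changes the computed value.

-- ===== PORT A =====
def pvSbStr : String := "Ljava/lang/StringBuilder;->append(Ljava/lang/String;)"
def pvSbChr : String := "Ljava/lang/StringBuilder;->append(C)"

-- A's inner while loop: (merged_count, j)
def pvA_inner (instrs : List String) (fuel cnt j : Nat) : Nat × Nat :=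
  match fuel with
  | 0 => (cnt, j)
  | fuel + 1 =>
    if j < instrs.length then
      -- js = instrs[j].strip()
      if PySem.Str.startswith (PySem.Str.strip (instrs.getD j "")) "const-string" &&
          decide (j + 1 < instrs.length) &&
          PySem.Str.isIn pvSbStr (PySem.Str.strip (instrs.getD (j + 1) "")) then
        pvA_inner instrs fuel (cnt + 1) (j + 2)
      else if (PySem.Str.startswith (PySem.Str.strip (instrs.getD j "")) "const/" ||
          PySem.Str.startswith (PySem.Str.strip (instrs.getD j "")) "const ") &&
          decide (j + 1 < instrs.length) &&
          PySem.Str.isIn pvSbChr (PySem.Str.strip (instrs.getD (j + 1) "")) then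
        pvA_inner instrs fuel (cnt + 1) (j + 2)
      else (cnt, j)
    else (cnt, j)

-- A's outer while loop
def pvA_loop (instrs : List String) (fuel : Nat) (acc : List String) (i : Nat) : List String :=
  match fuel with
  | 0 => acc
  | fuel + 1 =>
    if i < instrs.length then
      -- s = instrs[i].strip()
      if PySem.Str.startswith (PySem.Str.strip (instrs.getD i "")) "const-string" &&
          decide (i + 1 < instrs.length) &&
          PySem.Str.isIn pvSbStr (PySem.Str.strip (instrs.getD (i + 1) "")) then
        let r := pvA_inner instrs instrs.length 0 i
        if 2 ≤ r.1 then
          pvA_loop instrs fuel (acc ++ [instrs.getD i "", instrs.getD (i + 1) ""]) r.2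
        else
          pvA_loop instrs fuel (acc ++ [instrs.getD i ""]) (i + 1)
      else
        pvA_loop instrs fuel (acc ++ [instrs.getD i ""]) (i + 1)
    else acc

def merge_adjacent_stringbuilder_appends_py (instrs : List String) : List String :=
  pvA_loop instrs instrs.length [] 0

-- ===== PORT B =====
-- Source B: stripped = [s.strip() for s in instrs]
-- kind classification of an index (computed inside Source B's backward loop)
def pvB_kindOf (st : List String) (n i : Nat) : Nat :=
  if i + 1 < n then
    if PySem.Str.startswith (st.getD i "") "const-string" &&
        PySem.Str.isIn pvSbStr (st.getD (i + 1) "") then 1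
    else if (PySem.Str.startswith (st.getD i "") "const/" ||
        PySem.Str.startswith (st.getD i "") "const ") &&
        PySem.Str.isIn pvSbChr (st.getD (i + 1) "") then 2
    else 0
  else 0

-- Source B's backward DP loop (for i in range(n-1,-1,-1)), producing the kind and run tables
-- for indices i..n-1; run[i+2] is the element at offset 1 of the run table for i+1.. .
def pvB_fill (st : List String) (n i : Nat) : List Nat × List Nat :=
  if _h : i < n then
    match pvB_fill st n (i + 1) with
    | (k, r) =>
      (pvB_kindOf st n i :: k,
       (if pvB_kindOf st n i ≠ 0 then r.getD 1 0 + 1 else 0) :: r)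
  else ([], [])
termination_by n - i

-- Source B's emit while-loop
def pvB_emit (instrs : List String) (k r : List Nat) (fuel : Nat) (acc : List String) (i : Nat) :
    List String :=
  match fuel with
  | 0 => acc
  | fuel + 1 =>
    if i < instrs.length then
      if k.getD i 0 == 1 && 2 ≤ r.getD i 0 then
        pvB_emit instrs k r fuel (acc ++ [instrs.getD i "", instrs.getD (i + 1) ""])
          (i + 2 * r.getD i 0)
      else
        pvB_emit instrs k r fuel (acc ++ [instrs.getD i ""]) (i + 1)
    else acc

def merge_adjacent_stringbuilder_appends_py_alt (instrs : List String) : List String :=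
  let st := instrs.map PySem.Str.strip
  let kr := pvB_fill st instrs.length 0
  pvB_emit instrs kr.1 kr.2 instrs.length [] 0

-- ===== PRECONDITION & SPEC =====
def Spec_merge_adjacent_stringbuilder_appends_py (instrs : List String) (out : List String) : Prop := out = merge_adjacent_stringbuilder_appends_py_alt instrs
instance (instrs : List String) (out : List String) : Decidable (Spec_merge_adjacent_stringbuilder_appends_py instrs out) := by unfold Spec_merge_adjacent_stringbuilder_appends_py; infer_instance

-- ===== CLAIM (what is proved, stated in full; the proofs are below) =====
def Claim_equal_merge_adjacent_stringbuilder_appends_py : Prop := ∀ (instrs : List String), Dom_merge_adjacent_stringbuilder_appends_py instrs → Spec_merge_adjacent_stringbuilder_appends_py instrs (merge_adjacent_stringbuilder_appends_py instrs)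

-- ===== LEMMAS AND PROOFS =====

-- reference run-length function: run length of the step-2 pair chain starting at i
def pvRunF (st : List String) (n i : Nat) : Nat :=
  if _h : i < n then
    if pvB_kindOf st n i ≠ 0 then pvRunF st n (i + 2) + 1 else 0
  else 0
termination_by n - i

theorem pvRunF_zero (st : List String) (n i : Nat) (h : ¬ i < n) : pvRunF st n i = 0 := by
  rw [pvRunF, dif_neg h]

theorem pvRunF_pos (st : List String) (n i : Nat) (h : i < n)
    (hk : pvB_kindOf st n i ≠ 0) : pvRunF st n i = pvRunF st n (i + 2) + 1 := by
  conv_lhs => rw [pvRunF]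
  rw [dif_pos h, if_pos hk]

theorem pvRunF_none (st : List String) (n i : Nat) (hk : ¬ pvB_kindOf st n i ≠ 0) :
    pvRunF st n i = 0 := by
  by_cases h : i < n
  · rw [pvRunF, dif_pos h, if_neg hk]
  · exact pvRunF_zero st n i h

theorem pvKindOf_zero (st : List String) (n i : Nat) (h : ¬ i + 1 < n) :
    pvB_kindOf st n i = 0 := by
  unfold pvB_kindOf; simp [h]

-- the fill tables compute pvB_kindOf and pvRunF at each offset
theorem pvB_fill_spec (st : List String) (n : Nat) :
    ∀ m i, n - i ≤ m → ∀ d,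
      (pvB_fill st n i).1.getD d 0 = pvB_kindOf st n (i + d) ∧
      (pvB_fill st n i).2.getD d 0 = pvRunF st n (i + d) := by
  intro m
  induction m with
  | zero =>
    intro i hi d
    have h : ¬ i < n := by omega
    rw [pvB_fill, dif_neg h]
    refine ⟨?_, ?_⟩
    · rw [pvKindOf_zero st n _ (by omega)]; simp [List.getD]
    · rw [pvRunF_zero st n _ (by omega)]; simp [List.getD]
  | succ m ih =>
    intro i hi d
    by_cases h : i < n
    · rw [pvB_fill, dif_pos h]
      rcases hfill : pvB_fill st n (i + 1) with ⟨k, r⟩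
      have ihk := fun d => (ih (i + 1) (by omega) d).1
      have ihr := fun d => (ih (i + 1) (by omega) d).2
      rw [hfill] at ihk ihr
      simp only at ihk ihr
      cases d with
      | zero =>
        refine ⟨by simp, ?_⟩
        simp only [List.getD_cons_zero, Nat.add_zero]
        by_cases hk : pvB_kindOf st n i ≠ 0
        · rw [if_pos hk, pvRunF_pos st n i h hk]
          have := ihr 1
          rw [show i + 1 + 1 = i + 2 by omega] at this
          rw [this]
        · rw [if_neg hk, pvRunF_none st n i hk]
      | succ d =>
        have e : i + 1 + d = i + (d + 1) := by omega
        refine ⟨?_, ?_⟩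
        · simp only [List.getD_cons_succ]
          rw [ihk d, e]
        · simp only [List.getD_cons_succ]
          rw [ihr d, e]
    · have h2 : ¬ i + d < n := by omega
      have h3 : ¬ i + d + 1 < n := by omega
      rw [pvB_fill, dif_neg h]
      refine ⟨?_, ?_⟩
      · rw [pvKindOf_zero st n _ h3]; simp [List.getD]
      · rw [pvRunF_zero st n _ h2]; simp [List.getD]

-- the stripped table looks up to the strip of the original
theorem pvStrip_getD (instrs : List String) (j : Nat) :
    (instrs.map PySem.Str.strip).getD j "" = PySem.Str.strip (instrs.getD j "") := by
  rcases lt_or_ge j instrs.length with h | h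
  · simp [List.getD, h]
  · have e1 : instrs[j]? = none := List.getElem?_eq_none h
    have e2 : (instrs.map PySem.Str.strip)[j]? = none := List.getElem?_eq_none (by simpa using h)
    have e3 : PySem.Str.strip "" = "" := by decide
    simp [List.getD, e1, e2, e3]

-- kindOf over the stripped table, phrased on A's raw conditions
theorem pvKindOf_one_iff (instrs : List String) (i : Nat) :
    (pvB_kindOf (instrs.map PySem.Str.strip) instrs.length i = 1) ↔
      (PySem.Str.startswith (PySem.Str.strip (instrs.getD i "")) "const-string" &&
       decide (i + 1 < instrs.length) &&
       PySem.Str.isIn pvSbStr (PySem.Str.strip (instrs.getD (i + 1) ""))) = true := by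
  unfold pvB_kindOf
  rw [pvStrip_getD, pvStrip_getD]
  by_cases h : i + 1 < instrs.length
  · have hd : decide (i + 1 < instrs.length) = true := by simpa using h
    simp only [h, if_true]
    split_ifs with h1 h2 <;> simp_all
  · have hd : decide (i + 1 < instrs.length) = false := by simpa using h
    simp [h]

theorem pvKindOf_ne_iff (instrs : List String) (j : Nat) :
    (pvB_kindOf (instrs.map PySem.Str.strip) instrs.length j ≠ 0) ↔
      ((PySem.Str.startswith (PySem.Str.strip (instrs.getD j "")) "const-string" &&
        decide (j + 1 < instrs.length) &&
        PySem.Str.isIn pvSbStr (PySem.Str.strip (instrs.getD (j + 1) ""))) = true ∨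
       ((PySem.Str.startswith (PySem.Str.strip (instrs.getD j "")) "const/" ||
         PySem.Str.startswith (PySem.Str.strip (instrs.getD j "")) "const ") &&
        decide (j + 1 < instrs.length) &&
        PySem.Str.isIn pvSbChr (PySem.Str.strip (instrs.getD (j + 1) ""))) = true) := by
  unfold pvB_kindOf
  rw [pvStrip_getD, pvStrip_getD]
  by_cases h : j + 1 < instrs.length
  · have hd : decide (j + 1 < instrs.length) = true := by simpa using h
    simp only [h, if_true]
    split_ifs with h1 h2 <;> simp_all
  · have hd : decide (j + 1 < instrs.length) = false := by simpa using h
    simp [h]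

-- run lengths are bounded: 2*run(j) ≤ n - j
theorem pvRunF_bound (instrs : List String) :
    ∀ m j, instrs.length - j ≤ m →
      2 * pvRunF (instrs.map PySem.Str.strip) instrs.length j ≤ instrs.length - j := by
  intro m
  induction m with
  | zero =>
    intro j hj
    rw [pvRunF_zero _ _ _ (by omega)]; omega
  | succ m ih =>
    intro j hj
    by_cases hk : pvB_kindOf (instrs.map PySem.Str.strip) instrs.length j ≠ 0
    · have hj1 : j + 1 < instrs.length := by
        by_contra hc
        exact hk (pvKindOf_zero _ _ _ hc)
      rw [pvRunF_pos _ _ _ (by omega) hk]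
      have := ih (j + 2) (by omega)
      omega
    · rw [pvRunF_none _ _ _ hk]; omega

-- A's inner loop computes (cnt + run(j), j + 2*run(j))
theorem pvA_inner_eq_run (instrs : List String) :
    ∀ fuel cnt j, pvRunF (instrs.map PySem.Str.strip) instrs.length j < fuel →
      pvA_inner instrs fuel cnt j =
        (cnt + pvRunF (instrs.map PySem.Str.strip) instrs.length j,
         j + 2 * pvRunF (instrs.map PySem.Str.strip) instrs.length j) := by
  intro fuel
  induction fuel with
  | zero => intro cnt j h; omega
  | succ fuel ih =>
    intro cnt j h
    rw [pvA_inner]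
    by_cases hj : j < instrs.length
    · simp only [hj, if_true]
      by_cases hk : pvB_kindOf (instrs.map PySem.Str.strip) instrs.length j ≠ 0
      · have hrun := pvRunF_pos (instrs.map PySem.Str.strip) instrs.length j hj hk
        rcases (pvKindOf_ne_iff instrs j).mp hk with hs | hc
        · rw [if_pos hs, ih (cnt + 1) (j + 2) (by omega), hrun]
          simp only [Prod.mk.injEq]; omega
        · by_cases hs : (PySem.Str.startswith (PySem.Str.strip (instrs.getD j "")) "const-string" &&
              decide (j + 1 < instrs.length) &&
              PySem.Str.isIn pvSbStr (PySem.Str.strip (instrs.getD (j + 1) ""))) = true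
          · rw [if_pos hs, ih (cnt + 1) (j + 2) (by omega), hrun]
            simp only [Prod.mk.injEq]; omega
          · rw [if_neg hs, if_pos hc, ih (cnt + 1) (j + 2) (by omega), hrun]
            simp only [Prod.mk.injEq]; omega
      · have hrun := pvRunF_none (instrs.map PySem.Str.strip) instrs.length j hk
        have hni : ¬ _ := fun hc => hk ((pvKindOf_ne_iff instrs j).mpr hc)
        rw [not_or] at hni
        rw [if_neg hni.1, if_neg hni.2, hrun]
        simp
    · have hz := pvRunF_zero (instrs.map PySem.Str.strip) instrs.length j hj
      simp [hj, hz]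

-- the two main loops agree
theorem pvLoop_eq (instrs : List String) :
    ∀ fuel acc i,
      pvA_loop instrs fuel acc i =
        pvB_emit instrs (pvB_fill (instrs.map PySem.Str.strip) instrs.length 0).1
          (pvB_fill (instrs.map PySem.Str.strip) instrs.length 0).2 fuel acc i := by
  intro fuel
  induction fuel with
  | zero => intro acc i; rfl
  | succ fuel ih =>
    intro acc i
    rw [pvA_loop, pvB_emit]
    by_cases hi : i < instrs.length
    · simp only [hi, if_true]
      have hk := pvB_fill_spec (instrs.map PySem.Str.strip) instrs.length
        instrs.length 0 (by omega) i
      simp only [Nat.zero_add] at hk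
      have hrb := pvRunF_bound instrs (instrs.length - i) i (le_refl _)
      have hfuel : pvRunF (instrs.map PySem.Str.strip) instrs.length i < instrs.length := by
        omega
      by_cases hs : (PySem.Str.startswith (PySem.Str.strip (instrs.getD i "")) "const-string" &&
          decide (i + 1 < instrs.length) &&
          PySem.Str.isIn pvSbStr (PySem.Str.strip (instrs.getD (i + 1) ""))) = true
      · have hk1 : (pvB_fill (instrs.map PySem.Str.strip) instrs.length 0).1.getD i 0 = 1 := by
          rw [hk.1]; exact (pvKindOf_one_iff instrs i).mpr hs
        rw [if_pos hs, pvA_inner_eq_run instrs instrs.length 0 i hfuel]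
        simp only [Nat.zero_add]
        by_cases hm : 2 ≤ pvRunF (instrs.map PySem.Str.strip) instrs.length i
        · have hb : ((pvB_fill (instrs.map PySem.Str.strip) instrs.length 0).1.getD i 0 == 1 &&
              decide (2 ≤ (pvB_fill (instrs.map PySem.Str.strip) instrs.length 0).2.getD i 0)) = true := by
            rw [hk1, hk.2]; simp [hm]
          rw [if_pos hm, if_pos hb, hk.2]
          exact ih _ _
        · have hb : ((pvB_fill (instrs.map PySem.Str.strip) instrs.length 0).1.getD i 0 == 1 &&
              decide (2 ≤ (pvB_fill (instrs.map PySem.Str.strip) instrs.length 0).2.getD i 0)) = false := by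
            rw [hk1, hk.2]; simp [hm]
          rw [if_neg hm, if_neg (by rw [hb]; exact Bool.false_ne_true)]
          exact ih _ _
      · have hk1 : (pvB_fill (instrs.map PySem.Str.strip) instrs.length 0).1.getD i 0 ≠ 1 := by
          rw [hk.1]
          intro hx
          exact hs ((pvKindOf_one_iff instrs i).mp hx)
        have hb : ((pvB_fill (instrs.map PySem.Str.strip) instrs.length 0).1.getD i 0 == 1 &&
            decide (2 ≤ (pvB_fill (instrs.map PySem.Str.strip) instrs.length 0).2.getD i 0)) = false := by
          have h0 : ((pvB_fill (instrs.map PySem.Str.strip) instrs.length 0).1.getD i 0 == 1) = false := by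
            simpa using hk1
          rw [h0, Bool.false_and]
        rw [if_neg hs, if_neg (by rw [hb]; exact Bool.false_ne_true)]
        exact ih _ _
    · simp [hi]

-- ===== VERDICT (by name: the statement is the Claim_ definition above) =====
theorem merge_adjacent_stringbuilder_appends_py_spec : Claim_equal_merge_adjacent_stringbuilder_appends_py := by
  intro instrs _
  unfold Spec_merge_adjacent_stringbuilder_appends_py merge_adjacent_stringbuilder_appends_py merge_adjacent_stringbuilder_appends_py_alt
  exact pvLoop_eq instrs instrs.length [] 0
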